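-- pv_equiv track=rewrite | github.com/Pranavesh-Panakkal/OpenSafe-Mobility | modules/radar/radar_data.py | slice_list_and_provide_all_elements
-- ===== SOURCE A (Python) =====
-- def slice_list_and_provide_all_elements(
--     list_to_filter: list, item_to_match, inclusive: bool = True
-- ):
--     """
--     This code will find the last index of an item in the list and then get all element before that list
--     :param list_to_filter:
--     :type list_to_filter:
--     :param item_to_match:
--     :type item_to_match:
--     :return:
--     :rtype:
--     """
--     # Find all index of items matching the filter
--     indexes = [
--         index
--         for index in range(len(list_to_filter))
--         if list_to_filter[index] == item_to_match
--     ]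
--
--     # if no match, return the list
--     if len(indexes) < 1:
--         return list_to_filter
--
--     if inclusive:
--         last_index = indexes[-1] + 1
--     else:
--         last_index = indexes[-1]
--
--     return list_to_filter[:last_index]
-- ===== SOURCE B (Python) =====
-- def slice_list_and_provide_all_elements(
--     list_to_filter: list, item_to_match, inclusive: bool = True
-- ):
--     """Scan from the end and cut at the first (i.e. last) matching element."""
--     for i in range(len(list_to_filter) - 1, -1, -1):
--         if list_to_filter[i] == item_to_match:
--             return list_to_filter[: i + 1 if inclusive else i]
--     return list_to_filter
-- ===== Notes on version B (the rewrite author's own statement) =====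
-- stated objective: alternative
-- what changed: Replaces the build-all-matching-indices-then-take-last pass with a single early-exiting reverse scan that stops at the first match from the end.
import Mathlib
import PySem

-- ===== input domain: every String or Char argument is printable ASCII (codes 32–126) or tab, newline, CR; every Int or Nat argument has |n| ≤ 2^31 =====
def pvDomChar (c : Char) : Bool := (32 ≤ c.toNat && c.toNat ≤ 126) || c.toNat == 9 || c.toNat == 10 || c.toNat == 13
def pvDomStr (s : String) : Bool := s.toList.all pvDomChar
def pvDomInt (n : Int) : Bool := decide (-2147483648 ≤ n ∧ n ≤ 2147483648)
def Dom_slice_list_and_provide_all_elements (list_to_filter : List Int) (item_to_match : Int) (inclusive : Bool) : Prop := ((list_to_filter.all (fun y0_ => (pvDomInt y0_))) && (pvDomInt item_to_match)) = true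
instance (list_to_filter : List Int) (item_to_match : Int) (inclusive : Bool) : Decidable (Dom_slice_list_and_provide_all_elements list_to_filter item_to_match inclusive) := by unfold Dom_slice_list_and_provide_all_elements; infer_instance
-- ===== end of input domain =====

-- B replaces A's build-all-matching-indices-then-take-last pass with a single
-- early-exiting reverse scan (objective: alternative decomposition; same O(n) bound).

-- ===== PORT A =====
-- A: collect all matching indices, take the last (indexes[-1]), slice up to it.
def slice_list_and_provide_all_elements (list_to_filter : List Int) (item_to_match : Int) (inclusive : Bool) : List Int :=
  let indexes := (List.range list_to_filter.length).filter
      (fun index => list_to_filter.getD index 0 = item_to_match)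
  if indexes.length < 1 then list_to_filter
  else
    let last_index : Int :=
      if inclusive then (indexes.getLastD 0 : Int) + 1 else (indexes.getLastD 0 : Int)
    PySem.List.slice list_to_filter none (some last_index)

-- ===== PORT B =====
-- B's loop: i runs len-1, len-2, …, 0; the fuel argument is i+1.
def sliceAltGo (xs : List Int) (item : Int) (inclusive : Bool) : Nat → List Int
  | 0 => xs
  | i + 1 =>
      if xs.getD i 0 = item then xs.take (if inclusive then i + 1 else i)
      else sliceAltGo xs item inclusive i

def slice_list_and_provide_all_elements_alt (list_to_filter : List Int) (item_to_match : Int) (inclusive : Bool) : List Int :=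
  sliceAltGo list_to_filter item_to_match inclusive list_to_filter.length

-- ===== PRECONDITION & SPEC =====
def Spec_slice_list_and_provide_all_elements (list_to_filter : List Int) (item_to_match : Int) (inclusive : Bool) (out : List Int) : Prop := out = slice_list_and_provide_all_elements_alt list_to_filter item_to_match inclusive
instance (list_to_filter : List Int) (item_to_match : Int) (inclusive : Bool) (out : List Int) : Decidable (Spec_slice_list_and_provide_all_elements list_to_filter item_to_match inclusive out) := by unfold Spec_slice_list_and_provide_all_elements; infer_instance

-- ===== CLAIM (what is proved, stated in full; the proofs are below) =====
def Claim_equal_slice_list_and_provide_all_elements : Prop := ∀ (list_to_filter : List Int) (item_to_match : Int) (inclusive : Bool), Dom_slice_list_and_provide_all_elements list_to_filter item_to_match inclusive → Spec_slice_list_and_provide_all_elements list_to_filter item_to_match inclusive (slice_list_and_provide_all_elements list_to_filter item_to_match inclusive)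

-- ===== LEMMAS AND PROOFS =====

-- B's reverse scan computes "the last matching index below n, else the whole list".
theorem sliceAltGo_eq (xs : List Int) (item : Int) (inc : Bool) (n : Nat) :
    sliceAltGo xs item inc n =
      match ((List.range n).filter (fun i => xs.getD i 0 = item)).getLast? with
      | none => xs
      | some j => xs.take (if inc then j + 1 else j) := by
  induction n with
  | zero => simp [sliceAltGo]
  | succ n ih =>
      rw [List.range_succ, List.filter_append]
      by_cases h : xs.getD n 0 = item
      · simp only [sliceAltGo, h, if_true, List.filter_cons, List.filter_nil, decide_true,
          List.getLast?_concat]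
      · simp only [sliceAltGo, h, if_false, List.filter_cons, List.filter_nil, decide_false,
          List.append_nil, Bool.false_eq_true]
        exact ih

-- ===== VERDICT (by name: the statement is the Claim_ definition above) =====
theorem slice_list_and_provide_all_elements_spec : Claim_equal_slice_list_and_provide_all_elements := by
  intro xs item inc _
  unfold Spec_slice_list_and_provide_all_elements slice_list_and_provide_all_elements
    slice_list_and_provide_all_elements_alt
  rw [sliceAltGo_eq]
  cases hlast : ((List.range xs.length).filter (fun i => xs.getD i 0 = item)).getLast? with
  | none =>
      have he : (List.range xs.length).filter (fun i => xs.getD i 0 = item) = [] :=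
        List.getLast?_eq_none_iff.mp hlast
      rw [he]
      norm_num
  | some j =>
      have hne : (List.range xs.length).filter (fun i => xs.getD i 0 = item) ≠ [] := by
        intro h; rw [h] at hlast; simp at hlast
      have hlen : ¬ ((List.range xs.length).filter (fun i => xs.getD i 0 = item)).length < 1 := by
        simpa [Nat.lt_one_iff, List.length_eq_zero_iff] using hne
      have hD : ((List.range xs.length).filter (fun i => xs.getD i 0 = item)).getLastD 0 = j := by
        rw [List.getLastD_eq_getLast?, hlast]; rfl
      simp only [if_neg hlen, hD]
      cases inc with
      | false =>
          simp only [Bool.false_eq_true, if_false]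
          exact PySem.List.slice_to_natCast xs j
      | true =>
          simp only [if_true]
          rw [show ((j : Int) + 1) = ((j + 1 : Nat) : Int) by push_cast; ring]
          exact PySem.List.slice_to_natCast xs (j + 1)
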